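-- pv_equiv track=rewrite | github.com/ShiratsuYudachi/KichikuHelper | OCR.py | mergeSubtitle
-- ===== SOURCE A (Python) =====
-- def mergeSubtitle(list):
--     pass
--     i = 0
--     while i<len(list)-1:
--         if list[i][0] == list[i+1][0]:
--             list[i][3] = list[i+1][2]
--             del list[i+1]
--         else:
--             i+=1
--     return list
-- ===== SOURCE B (Python) =====
-- def mergeSubtitle(list):
--     out = []
--     for e in list:
--         if out and out[-1][0] == e[0]:
--             out[-1][3] = e[2]
--         else:
--             out.append(e)
--     list[:] = out
--     return list
-- ===== Notes on version B (the rewrite author's own statement) =====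
-- stated objective: idiomatic
-- what changed: Replaces the while-loop that repeatedly deletes list[i+1] in place with a single forward pass that appends entries to a result list, updating only the result's last entry when the key repeats.
import Mathlib
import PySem

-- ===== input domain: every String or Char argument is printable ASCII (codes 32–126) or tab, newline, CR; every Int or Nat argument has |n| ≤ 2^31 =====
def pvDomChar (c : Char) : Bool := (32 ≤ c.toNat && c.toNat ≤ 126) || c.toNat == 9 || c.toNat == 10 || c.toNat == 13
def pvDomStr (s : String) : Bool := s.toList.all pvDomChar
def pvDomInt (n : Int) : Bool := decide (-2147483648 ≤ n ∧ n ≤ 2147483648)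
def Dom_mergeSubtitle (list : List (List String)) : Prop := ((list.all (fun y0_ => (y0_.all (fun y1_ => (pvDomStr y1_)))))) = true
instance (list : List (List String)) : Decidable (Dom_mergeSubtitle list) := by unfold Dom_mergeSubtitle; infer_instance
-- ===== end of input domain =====

-- B merges equal-key runs in one forward pass that appends to a result list, instead of A's
-- while-loop with in-place deletes; both Pythons mutate the argument in place and the
-- equivalence proved here is about the return value (B writes back via list[:] = out).

-- ===== PORT A =====
-- while i < len(list)-1: compare list[i][0] / list[i+1][0]; on equality set list[i][3] := list[i+1][2]
-- and delete list[i+1], else i += 1.  (Python's element accesses raise outside Pre_; the port uses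
-- getD/set, which is exact on Pre_.)
def mergeA (l : List (List String)) (i : Nat) : List (List String) :=
  if _h : i + 1 < l.length then
    if (l.getD i []).head? = (l.getD (i+1) []).head? then
      mergeA ((l.set i ((l.getD i []).set 3 ((l.getD (i+1) []).getD 2 ""))).eraseIdx (i+1)) i
    else
      mergeA l (i+1)
  else l
termination_by l.length - i
decreasing_by
  · simp only [List.length_eraseIdx, List.length_set]; split <;> omega
  · omega

def mergeSubtitle (list : List (List String)) : List (List String) := mergeA list 0

-- ===== PORT B =====
-- one fold step: if out is nonempty and its last entry has the same key as e, update that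
-- entry's index 3 with e[2]; otherwise append e.
def stepB (out : List (List String)) (e : List String) : List (List String) :=
  match out.getLast? with
  | some last =>
    if last.head? = e.head? then out.dropLast ++ [last.set 3 (e.getD 2 "")]
    else out ++ [e]
  | none => out ++ [e]

def mergeSubtitle_alt (list : List (List String)) : List (List String) :=
  list.foldl stepB []

-- ===== PRECONDITION & SPEC =====
def entAt (l : List (List String)) (j : Nat) : List String := l.getD j []

-- Exactly the inputs on which the Python A returns (no IndexError): with ≥ 2 entries every entry
-- must be nonempty, every non-first member of a run of equal keys must have length ≥ 3, and the
-- first entry of every run of length > 1 must have length ≥ 4.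
def Pre_mergeSubtitle (list : List (List String)) : Prop :=
  list.length ≤ 1 ∨
    ((∀ e ∈ list, e ≠ []) ∧
     ∀ j < list.length - 1,
       (entAt list j).head? = (entAt list (j+1)).head? →
         (3 ≤ (entAt list (j+1)).length ∧
          ((j = 0 ∨ (entAt list (j-1)).head? ≠ (entAt list j).head?) → 4 ≤ (entAt list j).length)))
instance (list : List (List String)) : Decidable (Pre_mergeSubtitle list) := by
  unfold Pre_mergeSubtitle; infer_instance

def pvWitness_mergeSubtitle : List (List String) :=
  [["a", "x", "y", "z"], ["a", "p", "q"], ["b"]]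

def Spec_mergeSubtitle (list : List (List String)) (out : List (List String)) : Prop := out = mergeSubtitle_alt list
instance (list : List (List String)) (out : List (List String)) : Decidable (Spec_mergeSubtitle list out) := by unfold Spec_mergeSubtitle; infer_instance

-- ===== CLAIM (what is proved, stated in full; the proofs are below) =====
def Claim_equal_mergeSubtitle : Prop := ∀ (list : List (List String)), Dom_mergeSubtitle list → Pre_mergeSubtitle list → Spec_mergeSubtitle list (mergeSubtitle list)

-- ===== LEMMAS AND PROOFS =====

-- the common recursive characterisation of both ports
def mergeRec : List (List String) → List (List String)
  | [] => []
  | [e] => [e]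
  | a :: b :: t =>
    if a.head? = b.head? then mergeRec ((a.set 3 (b.getD 2 "")) :: t)
    else a :: mergeRec (b :: t)
termination_by l => l.length
decreasing_by all_goals simp

theorem mergeA_eq (rest : List (List String)) :
    ∀ pre : List (List String), mergeA (pre ++ rest) pre.length = pre ++ mergeRec rest := by
  induction rest using mergeRec.induct with
  | case1 => intro pre; rw [mergeA]; simp [mergeRec]
  | case2 e => intro pre; rw [mergeA]; simp [mergeRec]
  | case3 a b t h ih =>
    intro pre
    rw [mergeA]
    have hlen : pre.length + 1 < (pre ++ a :: b :: t).length := by simp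
    have hga : (pre ++ a :: b :: t).getD pre.length [] = a := by
      simp
    have hgb : (pre ++ a :: b :: t).getD (pre.length + 1) [] = b := by
      simp
    rw [dif_pos hlen, hga, hgb, if_pos h]
    have hset : (pre ++ a :: b :: t).set pre.length (a.set 3 (b.getD 2 "")) =
        pre ++ (a.set 3 (b.getD 2 "")) :: b :: t := by
      rw [List.set_append_right _ _ (le_refl _)]; simp
    have herase : (pre ++ (a.set 3 (b.getD 2 "")) :: b :: t).eraseIdx (pre.length + 1) =
        pre ++ (a.set 3 (b.getD 2 "")) :: t := by
      rw [List.eraseIdx_append_of_length_le (by omega)]; simp [List.eraseIdx]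
    rw [hset, herase, ih pre, mergeRec, if_pos h]
  | case4 a b t h ih =>
    intro pre
    rw [mergeA]
    have hlen : pre.length + 1 < (pre ++ a :: b :: t).length := by simp
    have hga : (pre ++ a :: b :: t).getD pre.length [] = a := by
      simp
    have hgb : (pre ++ a :: b :: t).getD (pre.length + 1) [] = b := by
      simp
    rw [dif_pos hlen, hga, hgb, if_neg h]
    have : pre ++ a :: b :: t = (pre ++ [a]) ++ b :: t := by simp
    rw [this]
    have hl : pre.length + 1 = (pre ++ [a]).length := by simp
    rw [hl, ih (pre ++ [a]), mergeRec, if_neg h]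
    simp

theorem foldB_eq (t : List (List String)) :
    ∀ (la : List String) (ys : List (List String)),
      List.foldl stepB (ys ++ [la]) t = ys ++ mergeRec (la :: t) := by
  induction t with
  | nil => intro la ys; simp [mergeRec]
  | cons e t ih =>
    intro la ys
    simp only [List.foldl_cons]
    by_cases h : la.head? = e.head?
    · have hstep : stepB (ys ++ [la]) e = ys ++ [la.set 3 (e.getD 2 "")] := by
        simp [stepB, h]
      rw [hstep, ih, mergeRec, if_pos h]
    · have hstep : stepB (ys ++ [la]) e = (ys ++ [la]) ++ [e] := by
        simp [stepB, h]
      rw [hstep, ih e (ys ++ [la]), mergeRec, if_neg h]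
      simp

theorem alt_eq_mergeRec (l : List (List String)) : mergeSubtitle_alt l = mergeRec l := by
  cases l with
  | nil => simp [mergeSubtitle_alt, mergeRec]
  | cons a t =>
    have h0 : stepB [] a = [a] := by simp [stepB]
    have := foldB_eq t a []
    simpa [mergeSubtitle_alt, h0] using this

theorem a_eq_mergeRec (l : List (List String)) : mergeSubtitle l = mergeRec l := by
  have := mergeA_eq l []
  simpa [mergeSubtitle] using this

-- ===== VERDICT (by name: the statement is the Claim_ definition above) =====
theorem mergeSubtitle_spec : Claim_equal_mergeSubtitle := by
  intro l _ _
  unfold Spec_mergeSubtitle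
  rw [a_eq_mergeRec, alt_eq_mergeRec]
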